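-- pv_equiv track=rewrite | github.com/albertobadia/faultcore | src/faultcore/reporting/html_renderer.py | _split_protocol_series_name
-- ===== SOURCE A (Python) =====
-- def _split_protocol_series_name(series_name: str) -> tuple[str, str] | None:
--     lowered = series_name.lower()
--     for candidate in ("tcp_", "udp_", "http_", "total_"):
--         if not lowered.startswith(candidate):
--             continue
--         base = series_name[len(candidate) :]
--         if base.endswith("_series"):
--             base = base[: -len("_series")]
--         return candidate[:-1], base
--     return None
-- ===== SOURCE B (Python) =====
-- def _split_protocol_series_name(series_name: str) -> tuple[str, str] | None:
--     i = series_name.find("_")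
--     if i == -1:
--         return None
--     proto = series_name[:i].lower()
--     if proto not in {"tcp", "udp", "http", "total"}:
--         return None
--     base = series_name[i + 1:]
--     if base.endswith("_series"):
--         base = base[:-7]
--     return proto, base
-- ===== Notes on version B (the rewrite author's own statement) =====
-- stated objective: idiomatic
-- what changed: Replaces the trial-prefix loop over four lowercased candidate prefixes with a single find of the first underscore, slicing out the protocol token once and testing it by set membership.
import Mathlib
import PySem

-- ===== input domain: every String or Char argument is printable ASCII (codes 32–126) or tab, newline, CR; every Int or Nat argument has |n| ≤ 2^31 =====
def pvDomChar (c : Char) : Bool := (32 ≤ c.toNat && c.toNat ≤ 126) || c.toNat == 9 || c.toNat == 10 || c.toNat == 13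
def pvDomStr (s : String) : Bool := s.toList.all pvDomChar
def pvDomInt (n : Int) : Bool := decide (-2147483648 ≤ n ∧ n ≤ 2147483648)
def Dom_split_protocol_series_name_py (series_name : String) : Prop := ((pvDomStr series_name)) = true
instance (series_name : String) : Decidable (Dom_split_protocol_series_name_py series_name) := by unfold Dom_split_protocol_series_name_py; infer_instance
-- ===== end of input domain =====

-- B parses by locating the first underscore once and testing the protocol token by set membership,
-- instead of A's trial-prefix loop over four lowercased candidates; same return value, no speed claim.

-- ===== PORT A =====
-- helper: the shared '_series' suffix strip (inline in the Python; hoisted as a named helper)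
def pvStripSeries (series_name : String) (candidate : String) : String :=
  let base := PySem.Str.slice series_name (some (PySem.Str.len candidate : Int)) none
  if PySem.Str.endswith base "_series" then PySem.Str.slice base none (some (-7)) else base

-- the 'for candidate in (...)' loop with its continue, as structural recursion over the tuple
def pvLoopA (series_name lowered : String) : List String → Option (String × String)
  | [] => none
  | candidate :: rest =>
    if PySem.Str.startswith lowered candidate then
      some (PySem.Str.slice candidate none (some (-1)), pvStripSeries series_name candidate)
    else pvLoopA series_name lowered rest

def split_protocol_series_name_py (series_name : String) : Option (String × String) :=
  pvLoopA series_name (PySem.Str.lower series_name) ["tcp_", "udp_", "http_", "total_"]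

-- ===== PORT B =====
def split_protocol_series_name_py_alt (series_name : String) : Option (String × String) :=
  let i := PySem.Str.find series_name "_"
  if i = -1 then none
  else
    let proto := PySem.Str.lower (PySem.Str.slice series_name none (some i))
    if proto ∈ ["tcp", "udp", "http", "total"] then
      let base := PySem.Str.slice series_name (some (i + 1)) none
      some (proto, if PySem.Str.endswith base "_series" then PySem.Str.slice base none (some (-7)) else base)
    else none

-- ===== PRECONDITION & SPEC =====
def Spec_split_protocol_series_name_py (series_name : String) (out : Option (String × String)) : Prop := out = split_protocol_series_name_py_alt series_name
instance (series_name : String) (out : Option (String × String)) : Decidable (Spec_split_protocol_series_name_py series_name out) := by unfold Spec_split_protocol_series_name_py; infer_instance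

-- ===== CLAIM (what is proved, stated in full; the proofs are below) =====
def Claim_equal_split_protocol_series_name_py : Prop := ∀ (series_name : String), Dom_split_protocol_series_name_py series_name → Spec_split_protocol_series_name_py series_name (split_protocol_series_name_py series_name)

-- ===== LEMMAS AND PROOFS =====

-- no character lowercases to '_': Python's .lower() cannot create an underscore
theorem pv_lowerChar_underscore (c : Char) : PySem.Chars.lowerChar c = '_' ↔ c = '_' := by
  constructor
  · intro h
    unfold PySem.Chars.lowerChar PySem.Chars.isupper at h
    split at h
    · rename_i hu
      simp only [Bool.and_eq_true, decide_eq_true_eq, Char.le_def] at hu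
      exfalso
      have h65 : 65 ≤ c.val.toNat := UInt32.le_iff_toNat_le.mp hu.1
      have h90 : c.val.toNat ≤ 90 := UInt32.le_iff_toNat_le.mp hu.2
      have hct : c.toNat = c.val.toNat := rfl
      have hv : (Char.ofNat (c.toNat + 32)).toNat = c.toNat + 32 := by
        rw [Char.toNat_ofNat, if_pos]
        left; omega
      rw [h] at hv
      have : ('_').toNat = 95 := by decide
      omega
    · exact h
  · intro h; subst h; rfl

theorem pv_getElem_lower (l : List Char) (i : Nat) :
    (PySem.Chars.lower l)[i]? = l[i]?.map PySem.Chars.lowerChar := by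
  simp [PySem.Chars.lower]

theorem pv_prefix_single (l : List Char) (i : Nat) :
    ['_'] <+: l.drop i ↔ l[i]? = some '_' := by
  rw [List.prefix_iff_eq_take]
  simp only [List.length_singleton, List.take_one, List.head?_drop]
  cases l[i]? <;> simp [eq_comm]

theorem pv_no_underscore_no_prefix (l cand : List Char) (hmem : '_' ∈ cand) (hno : '_' ∉ l) :
    ¬ (cand <+: PySem.Chars.lower l) := by
  intro h
  have hm : '_' ∈ PySem.Chars.lower l := h.subset hmem
  simp only [PySem.Chars.lower, List.mem_map] at hm
  obtain ⟨c, hcl, hlc⟩ := hm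
  exact hno (((pv_lowerChar_underscore c).mp hlc) ▸ hcl)

-- the heart of the equivalence: for an underscore-free candidate, 'lowered startswith (cand + "_")'
-- holds iff the FIRST underscore of the input sits exactly at |cand| and the token before it lowers to cand
theorem pv_starts_iff (l cand : List Char) (k : Nat)
    (hk : l[k]? = some '_') (hmin : ∀ i < k, l[i]? ≠ some '_') (hc : '_' ∉ cand) :
    ((cand ++ ['_']) <+: PySem.Chars.lower l) ↔ (k = cand.length ∧ PySem.Chars.lower (l.take k) = cand) := by
  constructor
  · intro hpre
    have hgets : ∀ i, i < cand.length + 1 → (PySem.Chars.lower l)[i]? = (cand ++ ['_'])[i]? := by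
      intro i hi
      have ht := List.prefix_iff_eq_take.mp hpre
      conv_rhs => rw [ht]
      rw [List.getElem?_take]
      rw [if_pos]
      simp only [List.length_append, List.length_singleton]
      omega
    have h_und : l[cand.length]? = some '_' := by
      have h1 := hgets cand.length (by omega)
      rw [List.getElem?_concat_length, pv_getElem_lower] at h1
      obtain ⟨c, hcl, hlc⟩ := Option.map_eq_some_iff.mp h1
      rw [(pv_lowerChar_underscore c).mp hlc] at hcl
      exact hcl
    have hkeq : k = cand.length := by
      rcases Nat.lt_or_ge k cand.length with hlt | hge
      · exfalso
        have h2 := hgets k (by omega)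
        rw [List.getElem?_append_left hlt, pv_getElem_lower, hk] at h2
        have h3 : cand[k]? = some '_' := by
          rw [← h2]; rfl
        exact hc (List.mem_of_getElem? h3)
      · rcases Nat.lt_or_ge cand.length k with hlt2 | _
        · exact absurd h_und (hmin _ hlt2)
        · omega
    refine ⟨hkeq, ?_⟩
    have ht := List.prefix_iff_eq_take.mp hpre
    have h4 := congrArg (List.take cand.length) ht
    rw [List.take_left] at h4
    rw [List.take_take] at h4
    simp only [List.length_append, List.length_singleton] at h4
    rw [min_eq_left (by omega)] at h4
    rw [hkeq]
    simp only [PySem.Chars.lower, List.map_take]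
    exact h4.symm
  · rintro ⟨hkeq, hlow⟩
    rw [List.prefix_iff_eq_take]
    have h1 : (PySem.Chars.lower l).take cand.length = cand := by
      rw [← hkeq]
      simpa only [PySem.Chars.lower, List.map_take] using hlow
    have h2 : (PySem.Chars.lower l)[cand.length]? = some '_' := by
      rw [pv_getElem_lower, ← hkeq, hk]; rfl
    simp only [List.length_append, List.length_singleton]
    rw [List.take_add_one, h1, h2]
    rfl


-- bridge: startswith at String level, for a candidate ending in '_', characterized by pv_starts_iff
theorem pv_starts_str (s : String) (k : Nat) (cand : List Char) (candS : String)
    (hk : s.toList[k]? = some '_') (hmin : ∀ i < k, s.toList[i]? ≠ some '_')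
    (hcs : candS.toList = cand ++ ['_']) (hc : '_' ∉ cand) :
    (PySem.Str.startswith (PySem.Str.lower s) candS = true
      ↔ (k = cand.length ∧ PySem.Chars.lower (s.toList.take k) = cand)) := by
  have h0 : PySem.Str.startswith (PySem.Str.lower s) candS
      = PySem.Chars.startswith (PySem.Str.lower s).toList candS.toList := rfl
  rw [h0, PySem.Str.toList_lower, hcs, PySem.Chars.startswith, List.isPrefixOf_iff_prefix]
  exact pv_starts_iff s.toList cand k hk hmin hc

-- ===== VERDICT (by name: the statement is the Claim_ definition above) =====
theorem split_protocol_series_name_py_spec : Claim_equal_split_protocol_series_name_py := by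
  intro s _
  unfold Spec_split_protocol_series_name_py
  rcases eq_or_ne (PySem.Str.find s "_") (-1) with hneg | hne
  · -- no underscore in the input: both return none
    have hno : '_' ∉ s.toList := by
      have h := (PySem.Chars.find_eq_neg_one_iff s.toList ['_']).mp hneg
      intro hm; exact h ((List.singleton_infix_iff '_' s.toList).mpr hm)
    have hsw : ∀ cand : List Char, '_' ∈ cand →
        PySem.Chars.startswith (PySem.Chars.lower s.toList) cand = false := by
      intro cand hcm
      rw [Bool.eq_false_iff]
      intro htrue
      rw [PySem.Chars.startswith, List.isPrefixOf_iff_prefix] at htrue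
      exact pv_no_underscore_no_prefix s.toList cand hcm hno htrue
    have hneg' : PySem.Chars.find s.toList ['_'] = -1 := hneg
    simp [split_protocol_series_name_py, split_protocol_series_name_py_alt, pvLoopA,
      hsw ['t','c','p','_'] (by decide), hsw ['u','d','p','_'] (by decide),
      hsw ['h','t','t','p','_'] (by decide), hsw ['t','o','t','a','l','_'] (by decide), hneg']
  · -- the input has a first underscore, at index k
    have h0 : 0 ≤ PySem.Chars.find s.toList ['_'] := by
      have h1 := PySem.Chars.neg_one_le_find s.toList ['_']
      have h2 : PySem.Chars.find s.toList ['_'] ≠ -1 := hne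
      omega
    obtain ⟨hpre0, hmin0⟩ := PySem.Chars.find_spec h0
    set k := (PySem.Chars.find s.toList ['_']).toNat with hkdef
    have hk : s.toList[k]? = some '_' := (pv_prefix_single _ _).mp hpre0
    have hmin : ∀ i < k, s.toList[i]? ≠ some '_' :=
      fun i hi hc => hmin0 i hi ((pv_prefix_single _ _).mpr hc)
    have hkl : k < s.toList.length := (List.getElem?_eq_some_iff.mp hk).1
    have hik : PySem.Str.find s "_" = (k : Int) := by
      show PySem.Chars.find s.toList ['_'] = (k : Int)
      rw [hkdef, Int.toNat_of_nonneg h0]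
    have hproto : (PySem.Str.lower (PySem.Str.slice s none (some ((k : Int))))).toList
        = PySem.Chars.lower (s.toList.take k) := by
      simp [pysem]
    have hPlen : (PySem.Chars.lower (s.toList.take k)).length = k := by
      simp only [PySem.Chars.lower, List.length_map, List.length_take]
      omega
    have hc1 := pv_starts_str s k ['t','c','p'] "tcp_" hk hmin rfl (by decide)
    have hc2 := pv_starts_str s k ['u','d','p'] "udp_" hk hmin rfl (by decide)
    have hc3 := pv_starts_str s k ['h','t','t','p'] "http_" hk hmin rfl (by decide)
    have hc4 := pv_starts_str s k ['t','o','t','a','l'] "total_" hk hmin rfl (by decide)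
    simp only [split_protocol_series_name_py, split_protocol_series_name_py_alt, pvLoopA, hik]
    rw [if_neg (by omega : ¬ ((k : Int) = -1))]
    by_cases h1 : PySem.Chars.lower (s.toList.take k) = ['t','c','p']
    · have hk3 : k = 3 := by rw [h1] at hPlen; simpa using hPlen.symm
      rw [if_pos (hc1.mpr ⟨by simp [hk3], h1⟩)]
      have hprotoS : PySem.Str.lower (PySem.Str.slice s none (some ((k : Int)))) = "tcp" :=
        String.toList_inj.mp (by rw [hproto, h1]; rfl)
      rw [hprotoS, if_pos (by decide : ("tcp" : String) ∈ ["tcp", "udp", "http", "total"])]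
      unfold pvStripSeries
      rw [show ((PySem.Str.len "tcp_" : Int)) = (k : Int) + 1 from by rw [hk3]; rfl]
      rfl
    · rw [if_neg (fun h => h1 (hc1.mp h).2)]
      by_cases h2 : PySem.Chars.lower (s.toList.take k) = ['u','d','p']
      · have hk3 : k = 3 := by rw [h2] at hPlen; simpa using hPlen.symm
        rw [if_pos (hc2.mpr ⟨by simp [hk3], h2⟩)]
        have hprotoS : PySem.Str.lower (PySem.Str.slice s none (some ((k : Int)))) = "udp" :=
          String.toList_inj.mp (by rw [hproto, h2]; rfl)
        rw [hprotoS, if_pos (by decide : ("udp" : String) ∈ ["tcp", "udp", "http", "total"])]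
        unfold pvStripSeries
        rw [show ((PySem.Str.len "udp_" : Int)) = (k : Int) + 1 from by rw [hk3]; rfl]
        rfl
      · rw [if_neg (fun h => h2 (hc2.mp h).2)]
        by_cases h3 : PySem.Chars.lower (s.toList.take k) = ['h','t','t','p']
        · have hk4 : k = 4 := by rw [h3] at hPlen; simpa using hPlen.symm
          rw [if_pos (hc3.mpr ⟨by simp [hk4], h3⟩)]
          have hprotoS : PySem.Str.lower (PySem.Str.slice s none (some ((k : Int)))) = "http" :=
            String.toList_inj.mp (by rw [hproto, h3]; rfl)
          rw [hprotoS, if_pos (by decide : ("http" : String) ∈ ["tcp", "udp", "http", "total"])]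
          unfold pvStripSeries
          rw [show ((PySem.Str.len "http_" : Int)) = (k : Int) + 1 from by rw [hk4]; rfl]
          rfl
        · rw [if_neg (fun h => h3 (hc3.mp h).2)]
          by_cases h4 : PySem.Chars.lower (s.toList.take k) = ['t','o','t','a','l']
          · have hk5 : k = 5 := by rw [h4] at hPlen; simpa using hPlen.symm
            rw [if_pos (hc4.mpr ⟨by simp [hk5], h4⟩)]
            have hprotoS : PySem.Str.lower (PySem.Str.slice s none (some ((k : Int)))) = "total" :=
              String.toList_inj.mp (by rw [hproto, h4]; rfl)
            rw [hprotoS, if_pos (by decide : ("total" : String) ∈ ["tcp", "udp", "http", "total"])]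
            unfold pvStripSeries
            rw [show ((PySem.Str.len "total_" : Int)) = (k : Int) + 1 from by rw [hk5]; rfl]
            rfl
          · rw [if_neg (fun h => h4 (hc4.mp h).2)]
            rw [if_neg ?_]
            intro hm
            have hm' := hm
            simp only [List.mem_cons] at hm'
            rcases hm' with h | h | h | h | h
            · exact h1 (by rw [← hproto, h]; rfl)
            · exact h2 (by rw [← hproto, h]; rfl)
            · exact h3 (by rw [← hproto, h]; rfl)
            · exact h4 (by rw [← hproto, h]; rfl)
            · simp at h
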